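-- pv_equiv track=rewrite | github.com/JRP4/rikiki | NE_bid_bot.py | refine_choices
-- ===== SOURCE A (Python) =====
-- def pick_winner_of_hand(played_cards, trump):
--     """
--     Determine the winning card of a trick.
--
--     Args:
--     played_cards (list): Cards played in the trick.
--     trump (str): The trump suit.
--
--     Returns:
--     int: Index of the winning card in played_cards.
--     """
--     current_winner = played_cards[0]
--     values = {"2":2, "3":3, "4":4, "5":5, "6":6, "7":7, "8":8, "9":9, "10":10, "J":11, "Q":12, "K":13, "A":14}
--
--     for card in played_cards[1:]:
--         # Compare cards of the same suit
--         if card[-1] == current_winner[-1] and values[card[:-1]] > values[current_winner[:-1]]: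
--             current_winner = card
--         # Trump card beats non-trump
--         elif current_winner[-1] != trump and card[-1] == trump:
--             current_winner = card
--
--     return played_cards.index(current_winner)
--
-- def refine_choices(played_cards, valid_cards, trump):
--     """
--     Refine the choice of cards to play based on the current trick state.
--
--     Args:
--     played_cards (list): Cards already played in the trick.
--     valid_cards (list): Valid cards that can be played.
--     trump (str): The trump suit.
--
--     Returns:
--     list: Refined list of cards to choose from.
--     """
--     values = {"2":2, "3":3, "4":4, "5":5, "6":6, "7":7, "8":8, "9":9, "10":10, "J":11, "Q":12, "K":13, "A":14}
--
--     if not played_cards or len(valid_cards) == 1: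
--         return valid_cards
--     else:
--         current_winner = played_cards[pick_winner_of_hand(played_cards, trump)]
--
--         # If we can't win, play the lowest card
--         if pick_winner_of_hand([current_winner] + valid_cards, trump) == 0:
--             card_values = [values[card[:-1]] for card in valid_cards]
--             min_value = card_values.index(min(card_values))
--             return [valid_cards[min_value]]
--         else:
--             # We might win, so keep all options open
--             return valid_cards
-- ===== SOURCE B (Python) =====
-- def refine_choices(played_cards, valid_cards, trump):
--     if not played_cards or len(valid_cards) == 1:
--         return valid_cards
--     values = {"2":2, "3":3, "4":4, "5":5, "6":6, "7":7, "8":8, "9":9, "10":10, "J":11, "Q":12, "K":13, "A":14}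
--     rank = lambda card: values[card[:-1]]
--
--     # Trick winner, derived from the rules rather than scanned: if any trump was
--     # played the highest trump wins, otherwise the highest card of the lead suit.
--     trumps = [c for c in played_cards if c[-1] == trump]
--     if trumps:
--         winner = max(trumps, key=rank)
--         can_win = any(c[-1] == trump and rank(c) > rank(winner) for c in valid_cards)
--     else:
--         lead = played_cards[0][-1]
--         winner = max([c for c in played_cards if c[-1] == lead], key=rank)
--         can_win = any((c[-1] == lead and rank(c) > rank(winner)) or c[-1] == trump
--                       for c in valid_cards)
--     if can_win:
--         return valid_cards
--     return [min(valid_cards, key=rank)]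
-- ===== Notes on version B (the rewrite author's own statement) =====
-- stated objective: alternative
-- what changed: B does not scan played cards with A's beats-update loop at all: it derives the trick winner from the rules by staged passes (filter the trump cards, else filter the lead-suit cards, take max(pool, key=rank)), decides 'can we win' with a per-branch any() predicate specialised to the winner's suit, and picks the fallback card with min(valid_cards, key=rank) instead of A's value-list/index dance.
-- outside the precondition, e.g. on refine_choices(['XH'], ['2S', '3S'], 'T'): A returns ['2S'], B raises KeyError
import Mathlib
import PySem

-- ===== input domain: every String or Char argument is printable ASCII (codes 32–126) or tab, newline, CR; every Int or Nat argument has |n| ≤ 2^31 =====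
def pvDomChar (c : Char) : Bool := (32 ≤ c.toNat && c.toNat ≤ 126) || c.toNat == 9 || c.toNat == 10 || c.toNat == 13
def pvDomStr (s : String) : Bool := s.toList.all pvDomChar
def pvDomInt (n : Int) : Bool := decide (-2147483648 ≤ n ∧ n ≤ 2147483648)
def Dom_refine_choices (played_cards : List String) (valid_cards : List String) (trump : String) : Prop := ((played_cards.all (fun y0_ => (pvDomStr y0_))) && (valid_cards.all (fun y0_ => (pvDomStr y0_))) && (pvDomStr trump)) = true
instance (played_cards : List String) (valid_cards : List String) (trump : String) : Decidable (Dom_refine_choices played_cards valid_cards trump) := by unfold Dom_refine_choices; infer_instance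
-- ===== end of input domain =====

-- B drops A's sequential beats-update scan entirely: it derives the trick winner from the
-- rules by staged passes (highest trump if any trump was played, else highest lead-suit
-- card, via filter + max with a rank key), decides 'can we win' with a per-branch any()
-- predicate, and picks the fallback card with min(valid_cards, key=rank); objective:
-- alternative. No argument is mutated by either version.

-- shared constant table: the 'values' dict of the Python module (defaults to 0 on a missing
-- key; Pre_ excludes inputs on which Python would look up a missing key, i.e. raise KeyError)
def pvRankVal (r : String) : Int :=
  if r == "2" then 2 else if r == "3" then 3 else if r == "4" then 4 else if r == "5" then 5
  else if r == "6" then 6 else if r == "7" then 7 else if r == "8" then 8 else if r == "9" then 9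
  else if r == "10" then 10 else if r == "J" then 11 else if r == "Q" then 12
  else if r == "K" then 13 else if r == "A" then 14 else 0

-- card[:-1]  (exact: slicing off the last code point)
def pvRank (c : String) : String := String.mk c.toList.dropLast
-- card[-1] as a 1-character string ("" only on the empty string, where Python raises IndexError; excluded by Pre_)
def pvLast (c : String) : String :=
  match c.toList.getLast? with
  | some ch => String.mk [ch]
  | none => ""

-- ===== PORT A =====
def pick_winner_of_hand (played_cards : List String) (trump : String) : Int :=
  let cw0 := (played_cards.head?).getD ""      -- played_cards[0]; "" unreachable: callers pass nonempty lists
  let cw := (played_cards.drop 1).foldl (fun current_winner card =>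
      if pvLast card == pvLast current_winner
          && decide (pvRankVal (pvRank card) > pvRankVal (pvRank current_winner)) then card
      else if pvLast current_winner != trump && pvLast card == trump then card
      else current_winner) cw0
  ((PySem.List.index? played_cards cw).getD 0 : Int)

def refine_choices (played_cards : List String) (valid_cards : List String) (trump : String) : List String :=
  if played_cards = [] ∨ valid_cards.length = 1 then valid_cards
  else
    let current_winner := (PySem.List.pyGet? played_cards (pick_winner_of_hand played_cards trump)).getD ""
    if pick_winner_of_hand (current_winner :: valid_cards) trump = 0 then
      let card_values := valid_cards.map (fun card => pvRankVal (pvRank card))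
      let min_value := (PySem.List.index? card_values ((PySem.List.min? card_values (fun x => x)).getD 0)).getD 0
      [(valid_cards[min_value]?).getD ""]
    else valid_cards

-- ===== PORT B =====
def refine_choices_alt (played_cards : List String) (valid_cards : List String) (trump : String) : List String :=
  if played_cards = [] ∨ valid_cards.length = 1 then valid_cards
  else
    let rank : String → Int := fun card => pvRankVal (pvRank card)
    let trumps := played_cards.filter (fun c => pvLast c == trump)
    let can_win :=
      if trumps ≠ [] then
        let winner := (PySem.List.max? trumps rank).getD ""
        valid_cards.any (fun c => pvLast c == trump && decide (rank c > rank winner))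
      else
        let lead := pvLast ((played_cards.head?).getD "")
        let winner := (PySem.List.max? (played_cards.filter (fun c => pvLast c == lead)) rank).getD ""
        valid_cards.any (fun c => (pvLast c == lead && decide (rank c > rank winner)) || pvLast c == trump)
    if can_win then valid_cards
    else [(PySem.List.min? valid_cards rank).getD ""]

-- ===== PRECONDITION & SPEC =====
-- Pre_ excludes inputs reaching the main branch that contain a malformed card (empty, or rank not a
-- key of 'values') or an empty valid_cards list: there Python A raises IndexError/KeyError/ValueError
-- on most such inputs, and on the rest (a malformed card whose lookup is skipped by short-circuiting)
-- A's returning at all is an accident of evaluation order.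
def Pre_refine_choices (played_cards : List String) (valid_cards : List String) (trump : String) : Prop :=
  played_cards = [] ∨ valid_cards.length = 1 ∨
    (valid_cards ≠ [] ∧ ∀ c ∈ played_cards ++ valid_cards, pvRankVal (pvRank c) ≠ 0)
instance (played_cards : List String) (valid_cards : List String) (trump : String) : Decidable (Pre_refine_choices played_cards valid_cards trump) := by unfold Pre_refine_choices; infer_instance

def pvWitness_refine_choices : List String × List String × String := (["2H", "KS"], ["3S", "AH"], "S")

def Spec_refine_choices (played_cards : List String) (valid_cards : List String) (trump : String) (out : List String) : Prop := out = refine_choices_alt played_cards valid_cards trump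
instance (played_cards : List String) (valid_cards : List String) (trump : String) (out : List String) : Decidable (Spec_refine_choices played_cards valid_cards trump out) := by unfold Spec_refine_choices; infer_instance

-- ===== CLAIM (what is proved, stated in full; the proofs are below) =====
def Claim_equal_refine_choices : Prop := ∀ (played_cards : List String) (valid_cards : List String) (trump : String), Dom_refine_choices played_cards valid_cards trump → Pre_refine_choices played_cards valid_cards trump → Spec_refine_choices played_cards valid_cards trump (refine_choices played_cards valid_cards trump)

-- ===== LEMMAS AND PROOFS =====

-- A's loop step, with the beating test named
def pvBeats (trump card winner : String) : Bool :=
  (pvLast card == pvLast winner && decide (pvRankVal (pvRank card) > pvRankVal (pvRank winner)))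
    || (pvLast winner != trump && pvLast card == trump)

-- the running-max / running-min steps hidden in Python's max(key=)/min(key=)
def pvMaxStep (m c : String) : String :=
  if pvRankVal (pvRank m) < pvRankVal (pvRank c) then c else m
def pvMinStep (m c : String) : String :=
  if pvRankVal (pvRank c) < pvRankVal (pvRank m) then c else m

theorem stepA_eq_stepB (trump : String) :
    (fun (current_winner card : String) =>
      if pvLast card == pvLast current_winner
          && decide (pvRankVal (pvRank card) > pvRankVal (pvRank current_winner)) then card
      else if pvLast current_winner != trump && pvLast card == trump then card
      else current_winner)
    = (fun (w card : String) => if pvBeats trump card w then card else w) := by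
  funext w card
  simp only [pvBeats, Bool.or_eq_true]
  by_cases h1 : (pvLast card == pvLast w && decide (pvRankVal (pvRank card) > pvRankVal (pvRank w))) = true <;>
    by_cases h2 : (pvLast w != trump && pvLast card == trump) = true <;>
    simp [h1, h2]

-- the fold result is a member of the start-value-cons-list
theorem foldl_step_mem (trump : String) :
    ∀ (l : List String) (w : String),
      l.foldl (fun w card => if pvBeats trump card w then card else w) w ∈ w :: l := by
  intro l
  induction l with
  | nil => intro w; simp
  | cons c t ih =>
    intro w
    simp only [List.foldl_cons]
    by_cases h : pvBeats trump c w = true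
    · rw [if_pos h]
      have h2 := ih c
      simp only [List.mem_cons] at h2 ⊢
      tauto
    · rw [if_neg h]
      have h2 := ih w
      simp only [List.mem_cons] at h2 ⊢
      tauto

theorem foldl_maxStep_mem :
    ∀ (l : List String) (w : String), l.foldl pvMaxStep w ∈ w :: l := by
  intro l
  induction l with
  | nil => intro w; simp
  | cons c t ih =>
    intro w
    simp only [List.foldl_cons, pvMaxStep]
    by_cases h : pvRankVal (pvRank w) < pvRankVal (pvRank c)
    · rw [if_pos h]
      have h2 := ih c
      simp only [List.mem_cons] at h2 ⊢
      tauto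
    · rw [if_neg h]
      have h2 := ih w
      simp only [List.mem_cons] at h2 ⊢
      tauto

-- index-then-get recovers a member
theorem pyGet_index_getD (xs : List String) (v : String) (hv : v ∈ xs) :
    (PySem.List.pyGet? xs ((PySem.List.index? xs v).getD 0 : Int)).getD "" = v := by
  induction xs with
  | nil => cases hv
  | cons x t ih =>
    by_cases hx : x = v
    · subst hx
      rw [PySem.List.index?_cons_self]
      simp
    · have hvt : v ∈ t := by
        rcases List.mem_cons.mp hv with h | h
        · exact absurd h.symm hx
        · exact h
      obtain ⟨k, hk⟩ := Option.isSome_iff_exists.1 ((PySem.List.index?_isSome_iff t v).2 hvt)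
      rw [PySem.List.index?_cons_of_ne t hx, hk]
      simp only [Option.map_some, Option.getD_some]
      have hcast : ((k + 1 : Nat) : Int) = ((k : Nat) : Int) + 1 := by push_cast; ring
      rw [hcast, PySem.List.pyGet?_cons_succ]
      have h2 := ih hvt
      rw [hk] at h2
      simpa using h2

-- beats is transitive towards the fixed base card
theorem beats_trans (trump c w cw : String)
    (h1 : pvBeats trump c w = true) (h2 : pvBeats trump w cw = true) :
    pvBeats trump c cw = true := by
  simp only [pvBeats, Bool.or_eq_true, Bool.and_eq_true, beq_iff_eq, bne_iff_ne,
    decide_eq_true_eq] at *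
  rcases h1 with ⟨e1, v1⟩ | ⟨n1, t1⟩ <;> rcases h2 with ⟨e2, v2⟩ | ⟨n2, t2⟩
  · exact Or.inl ⟨e1.trans e2, by omega⟩
  · exact Or.inr ⟨n2, e1.trans t2⟩
  · exact Or.inr ⟨e2 ▸ n1, t1⟩
  · exact absurd t2 n1

theorem beats_irrefl (trump c : String) : pvBeats trump c c = false := by
  simp [pvBeats]

-- once some card beats the original winner, the running winner keeps beating it
theorem foldl_keeps_beats (trump cw : String) :
    ∀ (l : List String) (w : String), pvBeats trump w cw = true →
      pvBeats trump (l.foldl (fun w card => if pvBeats trump card w then card else w) w) cw = true := by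
  intro l
  induction l with
  | nil => intro w h; simpa
  | cons c t ih =>
    intro w h
    simp only [List.foldl_cons]
    by_cases hc : pvBeats trump c w = true
    · rw [if_pos hc]
      exact ih c (beats_trans trump c w cw hc h)
    · rw [if_neg hc]
      exact ih w h

-- core characterisation: the scan sticks at cw iff no card beats cw
theorem foldl_eq_iff_no_beats (trump cw : String) :
    ∀ (l : List String),
      (l.foldl (fun w card => if pvBeats trump card w then card else w) cw = cw)
        ↔ ∀ c ∈ l, pvBeats trump c cw = false := by
  intro l
  induction l with
  | nil => simp
  | cons c t ih =>
    constructor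
    · intro h
      simp only [List.foldl_cons] at h
      by_cases hc : pvBeats trump c cw = true
      · exfalso
        rw [if_pos hc] at h
        have hb := foldl_keeps_beats trump cw t c hc
        rw [h, beats_irrefl] at hb
        exact Bool.false_ne_true hb
      · rw [if_neg hc] at h
        intro x hx
        rcases List.mem_cons.mp hx with rfl | hx'
        · exact Bool.eq_false_iff.mpr hc
        · exact (ih.1 h) x hx'
    · intro h
      have hc := h c List.mem_cons_self
      simp only [List.foldl_cons]
      rw [if_neg (by simp [hc])]
      exact ih.2 (fun x hx => h x (List.mem_cons_of_mem c hx))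

-- A's inner condition (winner of [cw]+valid is index 0) ⟺ no valid card beats cw
theorem cond_iff (trump cw : String) (valid : List String) :
    (pick_winner_of_hand (cw :: valid) trump = 0)
      ↔ (valid.any (fun card => pvBeats trump card cw) = false) := by
  unfold pick_winner_of_hand
  simp only [List.head?_cons, Option.getD_some, List.drop_one, List.tail_cons,
    stepA_eq_stepB trump]
  constructor
  · intro h
    by_cases hrc : valid.foldl (fun w card => if pvBeats trump card w then card else w) cw = cw
    · have hnb := (foldl_eq_iff_no_beats trump cw valid).1 hrc
      simp only [List.any_eq_false]
      intro c hcm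
      simp [hnb c hcm]
    · exfalso
      have hmem := foldl_step_mem trump valid cw
      have hrv : valid.foldl (fun w card => if pvBeats trump card w then card else w) cw ∈ valid := by
        rcases List.mem_cons.mp hmem with h' | h'
        · exact absurd h' hrc
        · exact h'
      rw [PySem.List.index?_cons_of_ne valid (fun e => hrc e.symm)] at h
      obtain ⟨k, hk⟩ := Option.isSome_iff_exists.1 ((PySem.List.index?_isSome_iff valid _).2 hrv)
      rw [hk] at h
      simp only [Option.map_some, Option.getD_some] at h
      omega
  · intro h
    have heq : valid.foldl (fun w card => if pvBeats trump card w then card else w) cw = cw :=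
      (foldl_eq_iff_no_beats trump cw valid).2 (by
        intro c hcm
        have := List.any_eq_false.1 h c hcm
        simpa using this)
    rw [heq, PySem.List.index?_cons_self]
    simp

-- max?/min? on a nonempty list are the running-extremum folds
theorem max?_cons_step (key : String → Int) (x c : String) (t : List String) :
    PySem.List.max? (x :: c :: t) key
      = PySem.List.max? ((if key x < key c then c else x) :: t) key := by
  simp only [PySem.List.max?, List.foldl_cons]
  by_cases h : key x < key c <;> simp [h]

theorem max?_cons_eq (key : String → Int) :
    ∀ (t : List String) (x : String),
      PySem.List.max? (x :: t) key
        = some (t.foldl (fun m c => if key m < key c then c else m) x) := by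
  intro t
  induction t with
  | nil => intro x; rfl
  | cons c t ih =>
    intro x
    rw [max?_cons_step key x c t, ih]
    simp only [List.foldl_cons]

theorem min?_cons_step (key : String → Int) (x c : String) (t : List String) :
    PySem.List.min? (x :: c :: t) key
      = PySem.List.min? ((if key c < key x then c else x) :: t) key := by
  simp only [PySem.List.min?, List.foldl_cons]
  by_cases h : key c < key x <;> simp [h]

theorem min?_cons_eq (key : String → Int) :
    ∀ (t : List String) (x : String),
      PySem.List.min? (x :: t) key
        = some (t.foldl (fun m c => if key c < key m then c else m) x) := by
  intro t
  induction t with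
  | nil => intro x; rfl
  | cons c t ih =>
    intro x
    rw [min?_cons_step key x c t, ih]
    simp only [List.foldl_cons]

-- beats-scan with a trump winner = running max over the remaining trump cards
theorem foldT (trump : String) :
    ∀ (l : List String) (w : String), pvLast w = trump →
      l.foldl (fun w card => if pvBeats trump card w then card else w) w
        = (l.filter (fun c => pvLast c == trump)).foldl pvMaxStep w := by
  intro l
  induction l with
  | nil => intro w _; rfl
  | cons c t ih =>
    intro w hw
    simp only [List.foldl_cons, List.filter_cons]
    by_cases hc : pvLast c = trump
    · have hcT : (pvLast c == trump) = true := beq_iff_eq.mpr hc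
      have hbeats : pvBeats trump c w = decide (pvRankVal (pvRank w) < pvRankVal (pvRank c)) := by
        simp [pvBeats, hw, hc, gt_iff_lt]
      have hstep : (if pvBeats trump c w = true then c else w) = pvMaxStep w c := by
        rw [hbeats]; simp only [pvMaxStep, decide_eq_true_eq]
      have hw' : pvLast (pvMaxStep w c) = trump := by
        unfold pvMaxStep
        by_cases h : pvRankVal (pvRank w) < pvRankVal (pvRank c)
        · rw [if_pos h]; exact hc
        · rw [if_neg h]; exact hw
      rw [hstep, hcT, if_pos rfl, List.foldl_cons]
      exact ih (pvMaxStep w c) hw'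
    · have hcT : (pvLast c == trump) = false := beq_eq_false_iff_ne.mpr hc
      have hbeats : pvBeats trump c w = false := by
        simp only [pvBeats, hw]
        simp [hcT]
      rw [hbeats, if_neg (by simp), hcT, if_neg (by simp)]
      exact ih w hw

-- beats-scan with a non-trump winner: the first trump takes over, else max of the winner's suit
theorem foldN (trump s : String) (hs : s ≠ trump) :
    ∀ (l : List String) (w : String), pvLast w = s →
      l.foldl (fun w card => if pvBeats trump card w then card else w) w
        = (match l.filter (fun c => pvLast c == trump) with
            | [] => (l.filter (fun c => pvLast c == s)).foldl pvMaxStep w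
            | t :: ts => ts.foldl pvMaxStep t) := by
  intro l
  induction l with
  | nil => intro w _; rfl
  | cons c t ih =>
    intro w hw
    by_cases hc : pvLast c = trump
    · have hcT : (pvLast c == trump) = true := beq_iff_eq.mpr hc
      have hbeats : pvBeats trump c w = true := by
        simp only [pvBeats, Bool.or_eq_true, Bool.and_eq_true, bne_iff_ne, beq_iff_eq]
        right
        exact ⟨by rw [hw]; exact hs, hc⟩
      simp only [List.foldl_cons, List.filter_cons, hbeats, hcT]
      simpa using foldT trump t c hc
    · have hcT : (pvLast c == trump) = false := beq_eq_false_iff_ne.mpr hc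
      by_cases hcs : pvLast c = s
      · have hcS : (pvLast c == s) = true := beq_iff_eq.mpr hcs
        have hbeats : pvBeats trump c w = decide (pvRankVal (pvRank w) < pvRankVal (pvRank c)) := by
          simp [pvBeats, hw, hcs, gt_iff_lt]
        have hstep : (if pvBeats trump c w = true then c else w) = pvMaxStep w c := by
          rw [hbeats]; simp only [pvMaxStep, decide_eq_true_eq]
        have hw' : pvLast (pvMaxStep w c) = s := by
          unfold pvMaxStep
          by_cases h : pvRankVal (pvRank w) < pvRankVal (pvRank c)
          · rw [if_pos h]; exact hcs
          · rw [if_neg h]; exact hw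
        rw [List.foldl_cons, hstep, ih (pvMaxStep w c) hw']
        simp only [List.filter_cons, hcT, hcS]
        cases htf : t.filter (fun c => pvLast c == trump) with
        | nil => simp [List.foldl_cons]
        | cons a b => simp
      · have hcS : (pvLast c == s) = false := beq_eq_false_iff_ne.mpr hcs
        have hbeats : pvBeats trump c w = false := by
          simp only [pvBeats, hw]
          simp [hcT, hcS]
        rw [List.foldl_cons, hbeats, if_neg (by simp), ih w hw]
        simp [hcT, hcS]

-- running min is below its accumulator
theorem fmin_le_acc :
    ∀ (l : List String) (x : String),
      pvRankVal (pvRank (l.foldl pvMinStep x)) ≤ pvRankVal (pvRank x) := by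
  intro l
  induction l with
  | nil => intro x; simp
  | cons c t ih =>
    intro x
    simp only [List.foldl_cons, pvMinStep]
    by_cases h : pvRankVal (pvRank c) < pvRankVal (pvRank x)
    · rw [if_pos h]
      exact le_trans (ih c) (le_of_lt h)
    · rw [if_neg h]
      exact ih x

-- first-minimum decomposition of the running-min fold
theorem firstMin :
    ∀ (l : List String) (x : String),
      ∃ pre suf, x :: l = pre ++ (l.foldl pvMinStep x) :: suf
        ∧ (∀ y ∈ pre, pvRankVal (pvRank (l.foldl pvMinStep x)) < pvRankVal (pvRank y))
        ∧ (∀ y ∈ suf, pvRankVal (pvRank (l.foldl pvMinStep x)) ≤ pvRankVal (pvRank y)) := by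
  intro l
  induction l with
  | nil => intro x; exact ⟨[], [], by simp⟩
  | cons c t ih =>
    intro x
    simp only [List.foldl_cons, pvMinStep]
    by_cases h : pvRankVal (pvRank c) < pvRankVal (pvRank x)
    · rw [if_pos h]
      obtain ⟨pre, suf, hdec, hpre, hsuf⟩ := ih c
      refine ⟨x :: pre, suf, by rw [List.cons_append, ← hdec], ?_, hsuf⟩
      intro y hy
      rcases List.mem_cons.mp hy with rfl | hy'
      · exact lt_of_le_of_lt (fmin_le_acc t c) h
      · exact hpre y hy'
    · rw [if_neg h]
      obtain ⟨pre, suf, hdec, hpre, hsuf⟩ := ih x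
      cases pre with
      | nil =>
        simp only [List.nil_append] at hdec
        have hx : t.foldl pvMinStep x = x := (List.cons.injEq _ _ _ _).mp hdec |>.1.symm
        have hts : suf = t := (List.cons.injEq _ _ _ _).mp hdec |>.2.symm
        refine ⟨[], c :: t, by simp [hx], by simp, ?_⟩
        intro y hy
        rcases List.mem_cons.mp hy with rfl | hy'
        · rw [hx]; omega
        · have h2 := hsuf y (by rw [hts]; exact hy')
          rw [hx] at h2 ⊢; exact h2
      | cons p pre' =>
        have hp : p = x := by
          have := congrArg List.head? hdec
          simpa using this.symm
        subst hp
        have htl : t = pre' ++ (t.foldl pvMinStep p) :: suf := by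
          have := congrArg List.tail hdec
          simpa using this
        have hx1 : pvRankVal (pvRank (t.foldl pvMinStep p)) < pvRankVal (pvRank p) :=
          hpre p List.mem_cons_self
        refine ⟨p :: c :: pre', suf, by rw [List.cons_append, List.cons_append, ← htl], ?_, hsuf⟩
        intro y hy
        rcases List.mem_cons.mp hy with rfl | hy'
        · exact hx1
        · rcases List.mem_cons.mp hy' with rfl | hy''
          · omega
          · exact hpre y (List.mem_cons_of_mem p hy'')

-- A's value-list / index dance equals B's min(valid, key=rank), on a nonempty list
theorem fallback_eq (x : String) (t : List String) :
    ((x :: t)[((PySem.List.index? ((x :: t).map (fun card => pvRankVal (pvRank card)))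
        ((PySem.List.min? ((x :: t).map (fun card => pvRankVal (pvRank card))) (fun v => v)).getD 0)).getD 0 : Nat)]?).getD ""
      = (PySem.List.min? (x :: t) (fun card => pvRankVal (pvRank card))).getD "" := by
  have hmin := min?_cons_eq (fun card => pvRankVal (pvRank card)) t x
  set m := t.foldl (fun m c => if pvRankVal (pvRank c) < pvRankVal (pvRank m) then c else m) x with hm
  have hmStep : m = t.foldl pvMinStep x := by rw [hm]; rfl
  obtain ⟨pre, suf, hdec, hpre, hsuf⟩ := by
    have := firstMin t x
    rwa [← hmStep] at this
  -- (a) the minimum of the mapped values is rank m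
  have hmem_m : m ∈ x :: t := by rw [hdec]; exact List.mem_append.2 (Or.inr List.mem_cons_self)
  have hval : (PySem.List.min? ((x :: t).map (fun card => pvRankVal (pvRank card))) (fun v => v)).getD 0
      = pvRankVal (pvRank m) := by
    obtain ⟨v, hv⟩ : ∃ v, PySem.List.min? ((x :: t).map (fun card => pvRankVal (pvRank card))) (fun v => v) = some v := by
      cases hmm : PySem.List.min? ((x :: t).map (fun card => pvRankVal (pvRank card))) (fun v => v) with
      | none => exact absurd ((PySem.List.min?_eq_none_iff _ _).mp hmm) (by simp)
      | some v => exact ⟨v, rfl⟩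
    have hvmem := PySem.List.min?_mem hv
    have hvmin := PySem.List.min?_isMin hv
    rw [hv, Option.getD_some]
    obtain ⟨y, hy, hyv⟩ := List.mem_map.1 hvmem
    have h1 : v ≤ pvRankVal (pvRank m) :=
      hvmin _ (List.mem_map.2 ⟨m, hmem_m, rfl⟩)
    have h2 : pvRankVal (pvRank m) ≤ v := by
      rw [← hyv]
      rw [hdec] at hy
      rcases List.mem_append.1 hy with hy' | hy'
      · exact le_of_lt (hpre y hy')
      · rcases List.mem_cons.mp hy' with rfl | hy''
        · exact le_refl _
        · exact hsuf y hy''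
    omega
  rw [hval]
  -- (b) the first index of value rank m is pre.length
  have hidx : PySem.List.index? ((x :: t).map (fun card => pvRankVal (pvRank card))) (pvRankVal (pvRank m))
      = some pre.length := by
    apply (PySem.List.index?_eq_some_iff _ _ _).2
    refine ⟨pre.map (fun card => pvRankVal (pvRank card)), suf.map (fun card => pvRankVal (pvRank card)), ?_, by simp, ?_⟩
    · rw [hdec]; simp
    · intro hmem
      obtain ⟨y, hy, hyv⟩ := List.mem_map.1 hmem
      have := hpre y hy
      omega
  rw [hidx, Option.getD_some]
  -- (c) the element at pre.length is m
  rw [hmin, Option.getD_some, hdec]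
  rw [List.getElem?_append_right (le_refl pre.length)]
  simp

-- ===== VERDICT (by name: the statement is the Claim_ definition above) =====
theorem refine_choices_spec : Claim_equal_refine_choices := by
  unfold Claim_equal_refine_choices
  intro played_cards valid_cards trump _ hpre
  unfold Spec_refine_choices refine_choices refine_choices_alt
  by_cases hguard : played_cards = [] ∨ valid_cards.length = 1
  · rw [if_pos hguard, if_pos hguard]
  · rw [if_neg hguard, if_neg hguard]
    have hvne : valid_cards ≠ [] := by
      rcases hpre with h | h | h
      · exact absurd (Or.inl h) hguard
      · exact absurd (Or.inr h) hguard
      · exact h.1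
    obtain ⟨v0, vt, rfl⟩ := List.exists_cons_of_ne_nil hvne
    obtain ⟨hd, rest, rfl⟩ := List.exists_cons_of_ne_nil (fun e => hguard (Or.inl e))
    have hcwA : (PySem.List.pyGet? (hd :: rest) (pick_winner_of_hand (hd :: rest) trump)).getD ""
        = rest.foldl (fun w card => if pvBeats trump card w then card else w) hd := by
      unfold pick_winner_of_hand
      simp only [List.head?_cons, Option.getD_some, List.drop_one, List.tail_cons,
        stepA_eq_stepB trump]
      exact pyGet_index_getD _ _ (by simpa using foldl_step_mem trump rest hd)
    set w := rest.foldl (fun w card => if pvBeats trump card w then card else w) hd with hwdef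
    have hMaxStepEq : (fun m c => if (fun card => pvRankVal (pvRank card)) m
        < (fun card => pvRankVal (pvRank card)) c then c else m) = pvMaxStep := rfl
    by_cases htr : (hd :: rest).filter (fun c => pvLast c == trump) = []
    -- ============ no trump was played ============
    · have hhdT : (pvLast hd == trump) = false := by
        cases hfc : pvLast hd == trump
        · rfl
        · rw [List.filter_cons, hfc] at htr; simp at htr
      have hhd : pvLast hd ≠ trump := by simpa using hhdT
      have hrt : rest.filter (fun c => pvLast c == trump) = [] := by
        rw [List.filter_cons, hhdT] at htr; simpa using htr
      have hwchar : w = (rest.filter (fun c => pvLast c == pvLast hd)).foldl pvMaxStep hd := by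
        have h1 := foldN trump (pvLast hd) hhd rest hd rfl
        rw [hrt] at h1
        exact h1
      have hwinB : (PySem.List.max? ((hd :: rest).filter
            (fun c => pvLast c == pvLast (((hd :: rest).head?).getD "")))
            (fun card => pvRankVal (pvRank card))).getD "" = w := by
        simp only [List.head?_cons, Option.getD_some, List.filter_cons, beq_self_eq_true,
          if_true]
        rw [max?_cons_eq, Option.getD_some, hMaxStepEq, ← hwchar]
      have hwlast : pvLast w = pvLast hd := by
        have hm := foldl_maxStep_mem (rest.filter (fun c => pvLast c == pvLast hd)) hd
        rw [← hwchar] at hm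
        rcases List.mem_cons.mp hm with h | h
        · rw [h]
        · exact beq_iff_eq.mp (List.mem_filter.mp h).2
      have hpred : ∀ c, pvBeats trump c w
          = ((pvLast c == pvLast (((hd :: rest).head?).getD "")
              && decide (pvRankVal (pvRank c) > pvRankVal (pvRank w)))
             || pvLast c == trump) := by
        intro c
        simp only [pvBeats, hwlast, List.head?_cons, Option.getD_some]
        have : (pvLast hd != trump) = true := by simpa [bne_iff_ne] using hhd
        rw [this, Bool.true_and]
      have hanyEq : ((v0 :: vt).any (fun c => pvBeats trump c w))
          = ((v0 :: vt).any (fun c =>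
              (pvLast c == pvLast (((hd :: rest).head?).getD "")
                && decide (pvRankVal (pvRank c) > pvRankVal (pvRank ((PySem.List.max?
                    ((hd :: rest).filter (fun c => pvLast c == pvLast (((hd :: rest).head?).getD "")))
                    (fun card => pvRankVal (pvRank card))).getD ""))))
               || pvLast c == trump)) := by
        rw [hwinB]
        exact congrArg _ (funext hpred)
      simp only [hcwA]
      rw [if_neg (not_not_intro htr), ← hanyEq]
      by_cases hany : (v0 :: vt).any (fun c => pvBeats trump c w) = true
      · rw [if_neg (fun h0 => by rw [(cond_iff trump w (v0 :: vt)).mp h0] at hany; exact Bool.false_ne_true hany),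
          if_pos hany]
      · have hanyF : (v0 :: vt).any (fun c => pvBeats trump c w) = false :=
          Bool.eq_false_iff.mpr hany
        rw [if_pos ((cond_iff trump w (v0 :: vt)).mpr hanyF), if_neg (by rw [hanyF]; simp)]
        exact congrArg (fun z => [z]) (fallback_eq v0 vt)
    -- ============ some trump was played ============
    · obtain ⟨t0, ts, htts⟩ := List.exists_cons_of_ne_nil htr
      have hwchar : w = ts.foldl pvMaxStep t0 := by
        cases hfc : pvLast hd == trump
        · have hhd : pvLast hd ≠ trump := by simpa using hfc
          have h1 := foldN trump (pvLast hd) hhd rest hd rfl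
          have hrt : rest.filter (fun c => pvLast c == trump) = t0 :: ts := by
            rw [List.filter_cons, hfc] at htts; simpa using htts
          rw [hrt] at h1
          exact h1
        · have hhd : pvLast hd = trump := beq_iff_eq.mp hfc
          have h1 := foldT trump rest hd hhd
          have hrt : hd :: rest.filter (fun c => pvLast c == trump) = t0 :: ts := by
            rw [List.filter_cons, hfc] at htts; simpa using htts
          have hhd0 : hd = t0 := (List.cons.injEq _ _ _ _).mp hrt |>.1
          have hrts : rest.filter (fun c => pvLast c == trump) = ts :=
            (List.cons.injEq _ _ _ _).mp hrt |>.2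
          rw [hwdef, h1, hrts, hhd0]
      have hwinB : (PySem.List.max? ((hd :: rest).filter (fun c => pvLast c == trump))
            (fun card => pvRankVal (pvRank card))).getD "" = w := by
        rw [htts, max?_cons_eq, Option.getD_some, hMaxStepEq, ← hwchar]
      have hwlast : pvLast w = trump := by
        have hm := foldl_maxStep_mem ts t0
        rw [← hwchar, ← htts] at hm
        exact beq_iff_eq.mp (List.mem_filter.mp hm).2
      have hpred : ∀ c, pvBeats trump c w
          = (pvLast c == trump && decide (pvRankVal (pvRank c) > pvRankVal (pvRank w))) := by
        intro c
        simp only [pvBeats, hwlast]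
        simp
      have hanyEq : ((v0 :: vt).any (fun c => pvBeats trump c w))
          = ((v0 :: vt).any (fun c => pvLast c == trump
              && decide (pvRankVal (pvRank c) > pvRankVal (pvRank ((PySem.List.max?
                  ((hd :: rest).filter (fun c => pvLast c == trump))
                  (fun card => pvRankVal (pvRank card))).getD "")))))  := by
        rw [hwinB]
        exact congrArg _ (funext hpred)
      simp only [hcwA]
      rw [if_pos htr, ← hanyEq]
      by_cases hany : (v0 :: vt).any (fun c => pvBeats trump c w) = true
      · rw [if_neg (fun h0 => by rw [(cond_iff trump w (v0 :: vt)).mp h0] at hany; exact Bool.false_ne_true hany),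
          if_pos hany]
      · have hanyF : (v0 :: vt).any (fun c => pvBeats trump c w) = false :=
          Bool.eq_false_iff.mpr hany
        rw [if_pos ((cond_iff trump w (v0 :: vt)).mpr hanyF), if_neg (by rw [hanyF]; simp)]
        exact congrArg (fun z => [z]) (fallback_eq v0 vt)
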